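-- pv_equiv track=rewrite | github.com/basbit/ailouros | backend/App/orchestration/application/nodes/_shared.py | _redact_database_url
-- ===== SOURCE A (Python) =====
-- def _redact_database_url(url: str) -> str:
--     u = url.strip()
--     for prefix in ("postgresql://", "postgres://", "mysql://", "mongodb://", "redis://"):
--         if not u.lower().startswith(prefix):
--             continue
--         try:
--             rest = u.split("://", 1)[1]
--             if "@" in rest:
--                 creds, hostpart = rest.rsplit("@", 1)
--                 if ":" in creds:
--                     user, _pw = creds.split(":", 1)
--                     return f"{prefix}{user}:***@{hostpart}"
--         except ValueError:
--             break
--     return u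
-- ===== SOURCE B (Python) =====
-- _SCHEMES = frozenset(("postgresql", "postgres", "mysql", "mongodb", "redis"))
--
--
-- def _redact_database_url(url: str) -> str:
--     u = url.strip()
--     # One pass over the characters: record the scheme separator position, the
--     # first ':' after it and the last '@'; then rebuild from the recorded indices.
--     sep = first_colon = last_at = -1
--     for i, ch in enumerate(u):
--         if sep < 0:
--             if ch == ':' and u[i:i + 3] == '://':
--                 sep = i
--         elif ch == ':' and first_colon < 0 and i >= sep + 3:
--             first_colon = i
--         elif ch == '@':
--             last_at = i
--     if sep < 0 or u[:sep].lower() not in _SCHEMES: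
--         return u
--     if last_at < 0 or first_colon < 0 or first_colon > last_at:
--         return u
--     return u[:sep].lower() + '://' + u[sep + 3:first_colon] + ':***@' + u[last_at + 1:]
-- ===== Notes on version B (the rewrite author's own statement) =====
-- stated objective: alternative
-- what changed: A loops over five case-insensitive scheme prefixes, re-splitting the URL with split/rsplit inside the loop; B makes a single character-by-character pass with an accumulator recording the separator position, the first colon after it and the last at-sign, then rebuilds the result from those three indices.
import Mathlib
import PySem

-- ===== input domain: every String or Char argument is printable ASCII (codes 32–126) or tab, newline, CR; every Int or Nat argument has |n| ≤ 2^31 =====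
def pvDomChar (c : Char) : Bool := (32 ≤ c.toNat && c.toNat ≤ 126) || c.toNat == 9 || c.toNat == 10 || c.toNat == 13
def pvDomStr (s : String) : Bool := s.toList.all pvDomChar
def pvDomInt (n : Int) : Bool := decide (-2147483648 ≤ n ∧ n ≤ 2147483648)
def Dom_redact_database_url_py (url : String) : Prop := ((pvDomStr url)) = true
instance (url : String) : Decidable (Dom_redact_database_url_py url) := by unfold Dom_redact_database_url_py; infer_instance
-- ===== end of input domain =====

-- B replaces A's loop of five case-insensitive startswith prefix tests (each re-splitting the URL with
-- split/rsplit) by a single character-by-character pass that records the separator position, the first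
-- colon after it and the last at-sign, then rebuilds from those indices (objective: alternative).

-- ===== PORT A =====
-- The try/except ValueError in A is dead code: str.split/str.rsplit with these non-empty separators never
-- raise ValueError.  split("://", 1)[1], rsplit("@", 1) and split(":", 1)[0] are hand-ported via the
-- first/last occurrence index (PySem has no split-with-maxsplit pair assignment): exact here, because the
-- guards guarantee the separator occurs ("://" by the startswith test, "@" and ":" by the `in` tests), so
-- with maxsplit=1 the two pieces are exactly "before the first (resp. last) occurrence" and the rest.
def pvPrefixes : List (List Char) :=
  ["postgresql://".toList, "postgres://".toList, "mysql://".toList, "mongodb://".toList, "redis://".toList]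

def pvRedactLoopA (u : List Char) : List (List Char) → List Char
  | [] => u
  | p :: ps =>
    if PySem.Chars.startswith (PySem.Chars.lower u) p then
      -- rest = u.split("://", 1)[1]
      let rest := u.drop ((PySem.Chars.find u "://".toList).toNat + 3)
      if PySem.Chars.isIn "@".toList rest then
        -- creds, hostpart = rest.rsplit("@", 1)
        let j := (PySem.Chars.rfind rest "@".toList).toNat
        let creds := rest.take j
        let hostpart := rest.drop (j + 1)
        if PySem.Chars.isIn ":".toList creds then
          -- user, _pw = creds.split(":", 1)
          let user := creds.take (PySem.Chars.find creds ":".toList).toNat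
          p ++ user ++ ":***@".toList ++ hostpart
        else pvRedactLoopA u ps
      else pvRedactLoopA u ps
    else pvRedactLoopA u ps

def redact_database_url_py (url : String) : String :=
  String.ofList (pvRedactLoopA (PySem.Chars.strip url.toList) pvPrefixes)

-- ===== PORT B =====
def pvSchemes : List (List Char) :=
  ["postgresql".toList, "postgres".toList, "mysql".toList, "mongodb".toList, "redis".toList]

-- the `for i, ch in enumerate(u)` loop of Source B, carried over the remaining characters; the slice test
-- u[i:i+3] == '://' is (c :: cs).take 3 = "://".toList because c :: cs is exactly u[i:] here (exact:
-- Python slices past the end clamp, as List.take does)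
def pvScanB : List Char → Nat → Int → Int → Int → Int × Int × Int
  | [], _, sep, fc, la => (sep, fc, la)
  | c :: cs, i, sep, fc, la =>
    if sep < 0 then
      if c = ':' ∧ (c :: cs).take 3 = "://".toList then pvScanB cs (i+1) (i : Int) fc la
      else pvScanB cs (i+1) sep fc la
    else if c = ':' ∧ fc < 0 ∧ sep + 3 ≤ (i : Int) then pvScanB cs (i+1) sep (i : Int) la
    else if c = '@' then pvScanB cs (i+1) sep fc (i : Int)
    else pvScanB cs (i+1) sep fc (la : Int)

def pvRedactC (u : List Char) : List Char :=
  let t := pvScanB u 0 (-1) (-1) (-1)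
  let sep := t.1
  let fc := t.2.1
  let la := t.2.2
  if sep < 0 ∨ PySem.Chars.lower (PySem.List.slice u none (some sep)) ∉ pvSchemes then u
  else if la < 0 ∨ fc < 0 ∨ la < fc then u
  else
    PySem.Chars.lower (PySem.List.slice u none (some sep)) ++ "://".toList
      ++ PySem.List.slice u (some (sep + 3)) (some fc) ++ ":***@".toList
      ++ PySem.List.slice u (some (la + 1)) none

def redact_database_url_py_alt (url : String) : String :=
  String.ofList (pvRedactC (PySem.Chars.strip url.toList))

-- ===== PRECONDITION & SPEC =====
def Spec_redact_database_url_py (url : String) (out : String) : Prop := out = redact_database_url_py_alt url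
instance (url : String) (out : String) : Decidable (Spec_redact_database_url_py url out) := by unfold Spec_redact_database_url_py; infer_instance

-- ===== CLAIM (what is proved, stated in full; the proofs are below) =====
def Claim_equal_redact_database_url_py : Prop := ∀ (url : String), Dom_redact_database_url_py url → Spec_redact_database_url_py url (redact_database_url_py url)

-- ===== LEMMAS AND PROOFS =====

-- proof-only midpoint: A's per-prefix loop collapsed to "first '://' , scheme membership, last '@', first ':'"
def pvRedactB (u : List Char) : List Char :=
  let i := PySem.Chars.find u "://".toList
  if i = -1 then u
  else
    let scheme := PySem.Chars.lower (u.take i.toNat)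
    let rest := u.drop (i.toNat + 3)
    if scheme ∈ pvSchemes then
      let j := PySem.Chars.rfind rest "@".toList
      if j = -1 then u
      else
        let creds := rest.take j.toNat
        let host := rest.drop (j.toNat + 1)
        let k := PySem.Chars.find creds ":".toList
        if k = -1 then u
        else scheme ++ "://".toList ++ creds.take k.toNat ++ ":***@".toList ++ host
    else u

theorem charOfNatToNat (n : Nat) (h : n < 55296) : (Char.ofNat n).toNat = n := by
  unfold Char.ofNat Char.toNat
  split <;> simp_all

theorem pvLowerChar_fixed (c d : Char) (hd : d.toNat < 65) :
    PySem.Chars.lowerChar c = d ↔ c = d := by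
  unfold PySem.Chars.lowerChar PySem.Chars.isupper
  have hA : ('A' ≤ c ↔ 65 ≤ c.toNat) := Iff.rfl
  have hZ : (c ≤ 'Z' ↔ c.toNat ≤ 90) := Iff.rfl
  constructor
  · intro h
    split_ifs at h with hc
    · exfalso
      simp only [Bool.and_eq_true, decide_eq_true_eq] at hc
      have h1 : (65 : Nat) ≤ c.toNat := hA.mp hc.1
      have h2 : c.toNat ≤ 90 := hZ.mp hc.2
      have := congrArg Char.toNat h
      rw [charOfNatToNat (c.toNat + 32) (by omega)] at this
      omega
    · exact h
  · intro h; subst h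
    have : ¬ ((decide ('A' ≤ c) && decide (c ≤ 'Z')) = true) := by
      simp only [Bool.and_eq_true, decide_eq_true_eq]
      rintro ⟨h1, _⟩
      exact absurd (hA.mp h1) (by omega)
    simp [this]

theorem pvMapLower_prefix (pat w : List Char) (h : ∀ c ∈ pat, c.toNat < 65) :
    pat <+: List.map PySem.Chars.lowerChar w ↔ pat <+: w := by
  induction pat generalizing w with
  | nil => simp
  | cons c pat ih =>
    cases w with
    | nil => simp
    | cons d w =>
      simp only [List.map_cons, List.cons_prefix_cons]
      constructor
      · rintro ⟨h1, h2⟩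
        exact ⟨((pvLowerChar_fixed d c (h c (by simp))).mp h1.symm).symm,
               (ih w (fun x hx => h x (by simp [hx]))).mp h2⟩
      · rintro ⟨h1, h2⟩
        refine ⟨?_, (ih w (fun x hx => h x (by simp [hx]))).mpr h2⟩
        rw [← h1]
        exact ((pvLowerChar_fixed c c (h c (by simp))).mpr rfl).symm

theorem pvRfindGo_eq_neg_one_iff (s sub : List Char) (k : Nat) :
    PySem.Chars.rfind.go s sub k = -1 ↔ ∀ i ≤ k, ¬ sub <+: s.drop i := by
  induction k with
  | zero =>
    rw [show PySem.Chars.rfind.go s sub 0 = if sub.isPrefixOf s then 0 else -1 from rfl]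
    rw [show (∀ i ≤ 0, ¬ sub <+: s.drop i) ↔ ¬ sub <+: s by
          constructor
          · intro h hp; exact h 0 (Nat.le_refl 0) (by simpa using hp)
          · intro h i hi hp; interval_cases i; exact h (by simpa using hp)]
    rw [← List.isPrefixOf_iff_prefix]
    cases sub.isPrefixOf s <;> simp
  | succ j ih =>
    rw [show PySem.Chars.rfind.go s sub (j+1)
          = if sub.isPrefixOf (s.drop (j+1)) then ((j:Int)+1) else PySem.Chars.rfind.go s sub j
        from rfl]
    cases hq : sub.isPrefixOf (s.drop (j + 1)) <;> simp only [Bool.false_eq_true, if_true, if_false]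
    · rw [ih]
      constructor
      · intro h i hi
        by_cases h' : i = j + 1
        · subst h'
          rw [← List.isPrefixOf_iff_prefix]
          simp [hq]
        · exact h i (by omega)
      · intro h i hi; exact h i (Nat.le_succ_of_le hi)
    · constructor
      · intro h; omega
      · intro h
        exact absurd (List.isPrefixOf_iff_prefix.mp hq) (h (j+1) (Nat.le_refl _))

theorem pvRfind_eq_neg_one_iff (s sub : List Char) :
    PySem.Chars.rfind s sub = -1 ↔ PySem.Chars.find s sub = -1 := by
  rw [PySem.Chars.find_eq_neg_one_iff]
  unfold PySem.Chars.rfind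
  rw [pvRfindGo_eq_neg_one_iff]
  rw [← PySem.Chars.isIn_iff_infix, ← PySem.Chars.exists_prefix_drop_iff_isIn]
  constructor
  · rintro h ⟨j, hj⟩
    by_cases hle : j ≤ s.length
    · exact h j hle hj
    · refine h s.length (Nat.le_refl _) ?_
      rwa [List.drop_eq_nil_of_le (by omega)] at hj ⊢

  · intro h i _ hp
    exact h ⟨i, hp⟩

set_option maxRecDepth 8192 in
theorem pvMatch_iff (v s : List Char) (hs : ':' ∉ s) :
    PySem.Chars.startswith (PySem.Chars.lower v) (s ++ "://".toList) = true ↔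
      (PySem.Chars.find v "://".toList = (s.length : Int) ∧
       PySem.Chars.lower (v.take s.length) = s) := by
  rw [PySem.Chars.startswith_iff]
  have hpatL : "://".toList = [':', '/', '/'] := rfl
  simp only [hpatL]
  have hpat65 : ∀ c ∈ ([':', '/', '/'] : List Char), c.toNat < 65 := by
    intro c hc
    simp only [List.mem_cons, List.not_mem_nil, or_false] at hc
    rcases hc with rfl | rfl | rfl <;> decide
  unfold PySem.Chars.lower
  constructor
  · rintro ⟨t, ht⟩
    have ht' : List.map PySem.Chars.lowerChar v = s ++ ([':', '/', '/'] ++ t) := by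
      rw [← ht, List.append_assoc]
    have htake : List.map PySem.Chars.lowerChar (v.take s.length) = s := by
      rw [List.map_take, ht', List.take_left' rfl]
    have hocc : [':', '/', '/'] <+: v.drop s.length := by
      rw [← pvMapLower_prefix _ _ hpat65, List.map_drop, ht', List.drop_left' rfl]
      exact ⟨t, rfl⟩
    have hmin : ∀ i < s.length, ¬ [':', '/', '/'] <+: v.drop i := by
      intro i hi hp
      obtain ⟨r, hr⟩ := hp
      have hdrop : List.drop i v = ':' :: '/' :: '/' :: r := hr.symm
      have hlen : i < v.length := by
        by_contra hnot
        rw [List.drop_eq_nil_of_le (by omega)] at hdrop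
        exact absurd hdrop (by simp)
      have hpf : 0 < (List.drop i v).length := by rw [List.length_drop]; omega
      have h0 : (List.drop i v)[0]'hpf = ':' := by
        rw [List.getElem_of_eq hdrop]
        rfl
      have h1' : (List.drop i v)[0]'hpf = v[i + 0]'(by omega) := List.getElem_drop
      have hvi : v[i]'hlen = ':' := by simpa using h1'.symm.trans h0
      have hlt : i < (List.map PySem.Chars.lowerChar v).length := by simp; omega
      have h1 : (List.map PySem.Chars.lowerChar v)[i]'hlt = ':' := by
        rw [List.getElem_map, hvi]
        decide
      have h2 := (List.getElem_of_eq ht' hlt).symm.trans h1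
      rw [List.getElem_append_left hi] at h2
      exact hs (h2 ▸ List.getElem_mem hi)
    refine ⟨?_, htake⟩
    have hinf : 0 ≤ PySem.Chars.find v [':', '/', '/'] := by
      rw [PySem.Chars.find_nonneg_iff, ← PySem.Chars.isIn_iff_infix,
        ← PySem.Chars.exists_prefix_drop_iff_isIn]
      exact ⟨s.length, hocc⟩
    obtain ⟨hpref, hleast⟩ := PySem.Chars.find_spec hinf
    have heq : (PySem.Chars.find v [':', '/', '/']).toNat = s.length := by
      rcases Nat.lt_trichotomy (PySem.Chars.find v [':', '/', '/']).toNat s.length with h | h | h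
      · exact absurd hpref (hmin _ h)
      · exact h
      · exact absurd hocc (hleast _ h)
    omega
  · rintro ⟨hf, htake⟩
    have h0 : (0:Int) ≤ PySem.Chars.find v [':', '/', '/'] := by rw [hf]; positivity
    obtain ⟨hpref, -⟩ := PySem.Chars.find_spec h0
    rw [hf] at hpref
    simp only [Int.toNat_natCast] at hpref
    rw [← pvMapLower_prefix _ _ hpat65] at hpref
    obtain ⟨w, hw⟩ := hpref
    refine ⟨w, ?_⟩
    calc s ++ [':', '/', '/'] ++ w
        = s ++ ([':', '/', '/'] ++ w) := by rw [List.append_assoc]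
      _ = List.map PySem.Chars.lowerChar (v.take s.length)
            ++ List.map PySem.Chars.lowerChar (v.drop s.length) := by rw [htake, hw]
      _ = List.map PySem.Chars.lowerChar (v.take s.length ++ v.drop s.length) := by
            rw [List.map_append]
      _ = List.map PySem.Chars.lowerChar v := by rw [List.take_append_drop]

def pvAfter (v : List Char) (n : Nat) : List Char :=
  let rest := v.drop (n + 3)
  if PySem.Chars.isIn "@".toList rest then
    let j := (PySem.Chars.rfind rest "@".toList).toNat
    let creds := rest.take j
    let hostpart := rest.drop (j + 1)
    if PySem.Chars.isIn ":".toList creds then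
      PySem.Chars.lower (v.take n) ++ "://".toList ++
        creds.take (PySem.Chars.find creds ":".toList).toNat ++ ":***@".toList ++ hostpart
    else v
  else v

theorem pvMatch_iff' (v s : List Char) (n : Nat) (hs : ':' ∉ s)
    (hn : PySem.Chars.find v "://".toList = (n : Int)) (hnlen : n ≤ v.length) :
    (PySem.Chars.startswith (PySem.Chars.lower v) (s ++ "://".toList) = true) ↔
      PySem.Chars.lower (v.take n) = s := by
  rw [pvMatch_iff v s hs]
  have hlentake : (PySem.Chars.lower (v.take n)).length = n := by
    unfold PySem.Chars.lower
    simp [List.length_take]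
    omega
  constructor
  · rintro ⟨hf, ht⟩
    have hsl : n = s.length := by
      rw [hn] at hf
      have : s.length = n := by exact_mod_cast hf.symm
      omega

    rw [hsl]
    exact ht
  · intro ht
    have hsl : n = s.length := by
      have := congrArg List.length ht
      rw [hlentake] at this
      exact this
    exact ⟨by rw [hn, hsl], by rw [← hsl]; exact ht⟩

theorem pvLoopA_all_false (v : List Char) (ps : List (List Char))
    (h : ∀ p ∈ ps, PySem.Chars.startswith (PySem.Chars.lower v) p = false) :
    pvRedactLoopA v ps = v := by
  induction ps with
  | nil => rfl
  | cons p ps ih =>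
    unfold pvRedactLoopA
    rw [h p (by simp)]
    simp only [Bool.false_eq_true, if_false]
    exact ih (fun q hq => h q (by simp [hq]))

theorem pvLoop_eq (v : List Char) (n : Nat)
    (hn : PySem.Chars.find v "://".toList = (n : Int)) (hnlen : n ≤ v.length)
    (ss : List (List Char)) (hss : ∀ s ∈ ss, ':' ∉ s) :
    pvRedactLoopA v (ss.map (fun s => s ++ "://".toList)) =
      if PySem.Chars.lower (v.take n) ∈ ss then pvAfter v n else v := by
  have hfn : (PySem.Chars.find v "://".toList).toNat = n := by
    rw [hn]; exact Int.toNat_natCast n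
  induction ss with
  | nil => simp [pvRedactLoopA]
  | cons s ss ih =>
    simp only [List.map_cons]
    unfold pvRedactLoopA
    by_cases hcond : PySem.Chars.lower (v.take n) = s
    · rw [(pvMatch_iff' v s n (hss s (by simp)) hn hnlen).mpr hcond]
      simp only [if_true, List.mem_cons]
      rw [if_pos (Or.inl hcond)]
      unfold pvAfter
      simp only [hfn]
      by_cases hA : PySem.Chars.isIn "@".toList (v.drop (n + 3)) = true
      · simp only [hA, if_true]
        by_cases hB : PySem.Chars.isIn ":".toList
            ((v.drop (n + 3)).take (PySem.Chars.rfind (v.drop (n + 3)) "@".toList).toNat) = true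
        · simp only [hB, if_true, hcond, List.append_assoc]
        · simp only [hB, Bool.false_eq_true, if_false]
          rw [ih (fun q hq => hss q (by simp [hq]))]
          by_cases hmem : PySem.Chars.lower (v.take n) ∈ ss
          · rw [if_pos hmem]
            unfold pvAfter
            simp only [hA, if_true]
            simp only [eq_false_of_ne_true hB, Bool.false_eq_true, if_false]
          · rw [if_neg hmem]
      · simp only [eq_false_of_ne_true hA, Bool.false_eq_true, if_false]
        rw [ih (fun q hq => hss q (by simp [hq]))]
        by_cases hmem : PySem.Chars.lower (v.take n) ∈ ss
        · rw [if_pos hmem]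
          unfold pvAfter
          simp only [eq_false_of_ne_true hA, Bool.false_eq_true, if_false]
        · rw [if_neg hmem]
    · have hfalse : PySem.Chars.startswith (PySem.Chars.lower v) (s ++ "://".toList) = false := by
        rw [Bool.eq_false_iff]
        intro htrue
        exact hcond ((pvMatch_iff' v s n (hss s (by simp)) hn hnlen).mp htrue)
      rw [hfalse]
      simp only [Bool.false_eq_true, if_false]
      rw [ih (fun q hq => hss q (by simp [hq]))]
      simp only [List.mem_cons]
      by_cases hmem : PySem.Chars.lower (v.take n) ∈ ss
      · rw [if_pos hmem, if_pos (Or.inr hmem)]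
      · rw [if_neg hmem, if_neg (by rintro (h | h); exact hcond h; exact hmem h)]

theorem pvKey (v : List Char) : pvRedactLoopA v pvPrefixes = pvRedactB v := by
  have hpp : pvPrefixes = pvSchemes.map (fun s => s ++ "://".toList) := by rfl
  have hss : ∀ s ∈ pvSchemes, ':' ∉ s := by decide
  unfold pvRedactB
  by_cases h0 : PySem.Chars.find v "://".toList = -1
  · rw [if_pos h0, hpp]
    apply pvLoopA_all_false
    intro p hp
    simp only [List.mem_map] at hp
    obtain ⟨s, hsmem, rfl⟩ := hp
    rw [Bool.eq_false_iff]
    intro htrue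
    obtain ⟨hf, -⟩ := (pvMatch_iff v s (hss s hsmem)).mp htrue
    rw [h0] at hf
    omega
  · have hge : (0:Int) ≤ PySem.Chars.find v "://".toList := by
      have := PySem.Chars.neg_one_le_find v "://".toList
      omega
    rw [if_neg h0, hpp]
    set n := (PySem.Chars.find v "://".toList).toNat with hndef
    have hn : PySem.Chars.find v "://".toList = (n : Int) := (Int.toNat_of_nonneg hge).symm
    have hnlen : n ≤ v.length := by
      have h1 := PySem.Chars.find_le_length v "://".toList
      omega
    rw [pvLoop_eq v n hn hnlen pvSchemes hss]
    by_cases hmem : PySem.Chars.lower (v.take n) ∈ pvSchemes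
    · rw [if_pos hmem, if_pos hmem]
      unfold pvAfter
      simp only [show "@".toList = ['@'] from rfl, show ":".toList = [':'] from rfl]
      by_cases hA : PySem.Chars.find (v.drop (n+3)) ['@'] = -1
      · have hr : PySem.Chars.rfind (v.drop (n+3)) ['@'] = -1 :=
          (pvRfind_eq_neg_one_iff _ _).mpr hA
        have hIn : PySem.Chars.isIn ['@'] (v.drop (n+3)) = false := by
          unfold PySem.Chars.isIn
          simp [hA]
        simp [hIn, hr]
      · have hr : ¬ PySem.Chars.rfind (v.drop (n+3)) ['@'] = -1 := by
          rw [pvRfind_eq_neg_one_iff]; exact hA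
        have hIn : PySem.Chars.isIn ['@'] (v.drop (n+3)) = true := by
          unfold PySem.Chars.isIn
          simp [hA]
        rw [if_neg hr]
        simp only [hIn, if_true]
        by_cases hB : PySem.Chars.find
            ((v.drop (n+3)).take (PySem.Chars.rfind (v.drop (n+3)) ['@']).toNat) [':'] = -1
        · have hInB : PySem.Chars.isIn [':']
              ((v.drop (n+3)).take (PySem.Chars.rfind (v.drop (n+3)) ['@']).toNat) = false := by
            unfold PySem.Chars.isIn
            simp [hB]
          simp [hInB, hB]
        · have hInB : PySem.Chars.isIn [':']
              ((v.drop (n+3)).take (PySem.Chars.rfind (v.drop (n+3)) ['@']).toNat) = true := by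
            unfold PySem.Chars.isIn
            simp [hB]
          rw [if_neg hB]
          simp [hInB, List.append_assoc]
    · rw [if_neg hmem, if_neg hmem]

theorem pvFind_cons (c : Char) (cs pat : List Char) :
    PySem.Chars.find (c :: cs) pat =
      if pat <+: (c :: cs) then 0
      else if PySem.Chars.find cs pat = -1 then -1 else PySem.Chars.find cs pat + 1 := by
  by_cases hp : pat <+: (c :: cs)
  · rw [if_pos hp]
    have hinf : 0 ≤ PySem.Chars.find (c :: cs) pat := by
      rw [PySem.Chars.find_nonneg_iff]
      exact hp.isInfix
    obtain ⟨hpref, hmin⟩ := PySem.Chars.find_spec hinf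
    have h0 : (PySem.Chars.find (c :: cs) pat).toNat = 0 := by
      by_contra hz
      exact hmin 0 (by omega) (by simpa using hp)
    omega
  · rw [if_neg hp]
    by_cases h2 : PySem.Chars.find cs pat = -1
    · rw [if_pos h2, PySem.Chars.find_eq_neg_one_iff]
      intro hinf
      rw [← PySem.Chars.isIn_iff_infix, ← PySem.Chars.exists_prefix_drop_iff_isIn] at hinf
      obtain ⟨j, hj⟩ := hinf
      cases j with
      | zero => exact hp (by simpa using hj)
      | succ j =>
        rw [PySem.Chars.find_eq_neg_one_iff] at h2
        apply h2
        rw [← PySem.Chars.isIn_iff_infix, ← PySem.Chars.exists_prefix_drop_iff_isIn]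
        exact ⟨j, by simpa using hj⟩
    · rw [if_neg h2]
      have hge : 0 ≤ PySem.Chars.find cs pat := by
        have := PySem.Chars.neg_one_le_find cs pat
        omega
      obtain ⟨hpref, hmin⟩ := PySem.Chars.find_spec hge
      set m := (PySem.Chars.find cs pat).toNat with hm
      have hinf : 0 ≤ PySem.Chars.find (c :: cs) pat := by
        rw [PySem.Chars.find_nonneg_iff, ← PySem.Chars.isIn_iff_infix,
          ← PySem.Chars.exists_prefix_drop_iff_isIn]
        exact ⟨m + 1, by simpa using hpref⟩
      obtain ⟨hpref', hmin'⟩ := PySem.Chars.find_spec hinf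
      set t := (PySem.Chars.find (c :: cs) pat).toNat with ht
      have htne : t ≠ 0 := by
        intro h0
        exact hp (by simpa [h0] using hpref')
      have h1 : m ≤ t - 1 := by
        by_contra hlt
        exact hmin (t - 1) (Nat.not_le.mp hlt) (by
          have hts : List.drop t (c :: cs) = List.drop (t - 1) cs := by
            conv_lhs => rw [show t = (t - 1) + 1 from by omega]
            exact List.drop_succ_cons
          rwa [hts] at hpref')
      have h2' : t ≤ m + 1 := by
        by_contra hgt
        exact hmin' (m + 1) (Nat.not_le.mp hgt) (by simpa using hpref)
      have : t = m + 1 := by omega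
      omega

theorem pvFind_single_cons (x c : Char) (cs : List Char) :
    PySem.Chars.find (c :: cs) [x] =
      if c = x then 0
      else if PySem.Chars.find cs [x] = -1 then -1 else PySem.Chars.find cs [x] + 1 := by
  rw [pvFind_cons]
  congr 1
  simp only [List.cons_prefix_cons, List.nil_prefix, and_true, eq_iff_iff]
  exact ⟨Eq.symm, Eq.symm⟩

theorem pvRfindGo_cons (c : Char) (cs sub : List Char) (k : Nat) :
    PySem.Chars.rfind.go (c :: cs) sub (k + 1) =
      if PySem.Chars.rfind.go cs sub k = -1 then (if sub.isPrefixOf (c :: cs) then 0 else -1)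
      else PySem.Chars.rfind.go cs sub k + 1 := by
  induction k with
  | zero =>
    rw [show PySem.Chars.rfind.go (c :: cs) sub 1
          = if sub.isPrefixOf cs then ((0:Int)+1) else PySem.Chars.rfind.go (c :: cs) sub 0 from rfl]
    rw [show PySem.Chars.rfind.go (c :: cs) sub 0 = if sub.isPrefixOf (c :: cs) then 0 else -1 from rfl]
    rw [show PySem.Chars.rfind.go cs sub 0 = if sub.isPrefixOf cs then 0 else -1 from rfl]
    cases hq : sub.isPrefixOf cs <;> simp
  | succ j ih =>
    rw [show PySem.Chars.rfind.go (c :: cs) sub (j + 1 + 1)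
          = if sub.isPrefixOf (cs.drop (j + 1)) then (((j:Int)+1)+1)
            else PySem.Chars.rfind.go (c :: cs) sub (j + 1) from rfl]
    rw [show PySem.Chars.rfind.go cs sub (j + 1)
          = if sub.isPrefixOf (cs.drop (j + 1)) then ((j:Int)+1) else PySem.Chars.rfind.go cs sub j from rfl]
    cases hq : sub.isPrefixOf (cs.drop (j + 1))
    · simpa using ih
    · have : ¬ ((j:Int) + 1 = -1) := by omega
      simp [this]

theorem pvNegOneLe_rfindGo (s sub : List Char) (k : Nat) : -1 ≤ PySem.Chars.rfind.go s sub k := by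
  induction k with
  | zero =>
    rw [show PySem.Chars.rfind.go s sub 0 = if sub.isPrefixOf s then 0 else -1 from rfl]
    split <;> omega
  | succ j ih =>
    rw [show PySem.Chars.rfind.go s sub (j + 1)
          = if sub.isPrefixOf (s.drop (j + 1)) then ((j:Int)+1) else PySem.Chars.rfind.go s sub j from rfl]
    split <;> omega

theorem pvNegOneLe_rfind (s sub : List Char) : -1 ≤ PySem.Chars.rfind s sub :=
  pvNegOneLe_rfindGo s sub s.length

theorem pvRfind_cons (c : Char) (cs sub : List Char) :
    PySem.Chars.rfind (c :: cs) sub =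
      if PySem.Chars.rfind cs sub = -1 then (if sub.isPrefixOf (c :: cs) then 0 else -1)
      else PySem.Chars.rfind cs sub + 1 := by
  show PySem.Chars.rfind.go (c :: cs) sub (cs.length + 1) = _
  rw [pvRfindGo_cons]
  rfl

theorem pvRfind_single_prefix (x : Char) (l : List Char) :
    PySem.Chars.rfind l [x] = -1 ∨
      (0 ≤ PySem.Chars.rfind l [x] ∧ [x] <+: l.drop ((PySem.Chars.rfind l [x]).toNat)) := by
  induction l with
  | nil => left; rfl
  | cons c cs ih =>
    rw [pvRfind_cons]
    by_cases hr : PySem.Chars.rfind cs [x] = -1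
    · rw [if_pos hr]
      by_cases hx : x = c
      · right
        have hpf : List.isPrefixOf [x] (c :: cs) = true := by simp [List.isPrefixOf, hx]
        rw [if_pos hpf]
        exact ⟨by omega, by simp [hx]⟩
      · left
        have hpf : List.isPrefixOf [x] (c :: cs) = false := by simp [List.isPrefixOf, hx]
        rw [hpf]
        simp
    · rcases ih with h | ⟨h0, hp⟩
      · exact absurd h hr
      · rw [if_neg hr]
        right
        refine ⟨by omega, ?_⟩
        have ht : (PySem.Chars.rfind cs [x] + 1).toNat = (PySem.Chars.rfind cs [x]).toNat + 1 := by
          omega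
        rw [ht, List.drop_succ_cons]
        exact hp

theorem pvFind_nil (x : Char) : PySem.Chars.find ([] : List Char) [x] = -1 := rfl

theorem pvFind_single_take (x : Char) (l : List Char) : ∀ m : Nat,
    PySem.Chars.find (l.take m) [x] =
      if 0 ≤ PySem.Chars.find l [x] ∧ PySem.Chars.find l [x] < (m:Int) then PySem.Chars.find l [x]
      else -1 := by
  induction l with
  | nil =>
    intro m
    simp [pvFind_nil]
  | cons c cs ih =>
    intro m
    cases m with
    | zero =>
      rw [List.take_zero, pvFind_nil]
      have := PySem.Chars.neg_one_le_find (c :: cs) [x]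
      split_ifs with h
      · exfalso
        have h2 := h.2
        push_cast at h2
        omega
      · rfl
    | succ m =>
      rw [List.take_succ_cons, pvFind_single_cons x c (cs.take m), pvFind_single_cons x c cs, ih m]
      have hfge := PySem.Chars.neg_one_le_find cs [x]
      by_cases hc : c = x
      · simp only [if_pos hc]
        rw [if_pos ⟨le_refl (0:Int), by exact_mod_cast Nat.succ_pos m⟩]
      · simp only [if_neg hc]
        clear ih
        split_ifs <;> push_cast at * <;> try omega
        all_goals exact absurd trivial (by assumption)


theorem pvRfind_nil (sub : List Char) (h : sub ≠ []) : PySem.Chars.rfind [] sub = -1 := by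
  show PySem.Chars.rfind.go [] sub 0 = -1
  rw [show PySem.Chars.rfind.go [] sub 0 = if sub.isPrefixOf ([] : List Char) then 0 else -1 from rfl]
  cases sub with
  | nil => exact absurd rfl h
  | cons a t => rfl

theorem pvScanB_post (cs : List Char) : ∀ (i : Nat) (sep fc la : Int), 0 ≤ sep → sep + 3 ≤ (i:Int) →
    pvScanB cs i sep fc la =
      (sep,
       if fc < 0 then
         (if PySem.Chars.find cs [':'] = -1 then fc else (i:Int) + PySem.Chars.find cs [':'])
       else fc,
       if PySem.Chars.rfind cs ['@'] = -1 then la else (i:Int) + PySem.Chars.rfind cs ['@']) := by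
  induction cs with
  | nil =>
    intro i sep fc la h0 h3
    rw [pvFind_nil, pvRfind_nil ['@'] (by simp)]
    simp [pvScanB]
  | cons c cs ih =>
    intro i sep fc la h0 h3
    have hfge := PySem.Chars.neg_one_le_find cs [':']
    have hrge := pvNegOneLe_rfind cs ['@']
    rw [show pvScanB (c :: cs) i sep fc la
          = if sep < 0 then
              (if c = ':' ∧ (c :: cs).take 3 = "://".toList then pvScanB cs (i+1) (i : Int) fc la
               else pvScanB cs (i+1) sep fc la)
            else if c = ':' ∧ fc < 0 ∧ sep + 3 ≤ (i : Int) then pvScanB cs (i+1) sep (i : Int) la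
            else if c = '@' then pvScanB cs (i+1) sep fc (i : Int)
            else pvScanB cs (i+1) sep fc la from rfl]
    rw [if_neg (by omega), pvFind_single_cons ':' c cs, pvRfind_cons c cs ['@']]
    by_cases hc : c = ':'
    · have hpf : List.isPrefixOf ['@'] (c :: cs) = false := by simp [List.isPrefixOf, hc]
      rw [hpf, if_pos hc]
      by_cases hf : fc < 0
      · rw [if_pos ⟨hc, hf, h3⟩, ih (i+1) sep (i:Int) la h0 (by push_cast; omega)]
        refine congrArg _ (congrArg₂ _ ?_ ?_) <;>
          (split_ifs <;> push_cast at * <;>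
            first | omega | exact absurd trivial (by assumption) | exact absurd rfl (by assumption))
      · rw [if_neg (by intro h; exact hf h.2.1), if_neg (by simp [hc]),
          ih (i+1) sep fc la h0 (by push_cast; omega)]
        refine congrArg _ (congrArg₂ _ ?_ ?_) <;>
          (split_ifs <;> push_cast at * <;>
            first | omega | exact absurd trivial (by assumption) | exact absurd rfl (by assumption))
    · rw [if_neg (by intro h; exact hc h.1), if_neg hc]
      by_cases ha : c = '@'
      · have hpf : List.isPrefixOf ['@'] (c :: cs) = true := by simp [List.isPrefixOf, ha]
        rw [if_pos ha, hpf, ih (i+1) sep fc (i:Int) h0 (by push_cast; omega)]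
        refine congrArg _ (congrArg₂ _ ?_ ?_) <;>
          (split_ifs <;> push_cast at * <;>
            first | omega | exact absurd trivial (by assumption) | exact absurd rfl (by assumption))
      · have hpf : List.isPrefixOf ['@'] (c :: cs) = false := by
          simp only [List.isPrefixOf, List.isPrefixOf_nil_left, Bool.and_true, beq_eq_false_iff_ne, ne_eq]
          exact fun h => ha h.symm
        rw [if_neg ha, hpf, ih (i+1) sep fc la h0 (by push_cast; omega)]
        refine congrArg _ (congrArg₂ _ ?_ ?_) <;>
          (split_ifs <;> push_cast at * <;>
            first | omega | exact absurd trivial (by assumption) | exact absurd rfl (by assumption))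

theorem pvScanB_pre (cs : List Char) : ∀ i : Nat,
    pvScanB cs i (-1) (-1) (-1) =
      if PySem.Chars.find cs "://".toList = -1 then (-1, -1, -1)
      else
        pvScanB (cs.drop ((PySem.Chars.find cs "://".toList).toNat + 3))
          (i + (PySem.Chars.find cs "://".toList).toNat + 3)
          ((i : Int) + ((PySem.Chars.find cs "://".toList).toNat : Int)) (-1) (-1) := by
  induction cs with
  | nil =>
    intro i
    rw [if_pos (by rw [PySem.Chars.find_eq_neg_one_iff]; simp)]
    rfl
  | cons c cs ih =>
    intro i
    have hiff : (c = ':' ∧ (c :: cs).take 3 = "://".toList) ↔ "://".toList <+: (c :: cs) := by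
      rw [List.prefix_iff_eq_take]
      constructor
      · rintro ⟨-, h⟩; exact h.symm
      · intro h
        refine ⟨?_, h.symm⟩
        have := congrArg (fun l => l.head?) h
        simpa using this.symm
    rw [show pvScanB (c :: cs) i (-1) (-1) (-1)
          = if (-1:Int) < 0 then
              (if c = ':' ∧ (c :: cs).take 3 = "://".toList then pvScanB cs (i+1) (i : Int) (-1) (-1)
               else pvScanB cs (i+1) (-1) (-1) (-1))
            else if c = ':' ∧ (-1:Int) < 0 ∧ (-1:Int) + 3 ≤ (i : Int) then pvScanB cs (i+1) (-1) (i : Int) (-1)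
            else if c = '@' then pvScanB cs (i+1) (-1) (-1) (i : Int)
            else pvScanB cs (i+1) (-1) (-1) (-1) from rfl]
    rw [if_pos (by omega), pvFind_cons c cs "://".toList]
    by_cases hp : "://".toList <+: (c :: cs)
    · have hc : c = ':' := (hiff.mpr hp).1
      have htk := (hiff.mpr hp).2
      rw [if_pos (hiff.mpr hp), if_pos hp, if_neg (show ¬ ((0:Int) = -1) from by omega)]
      obtain ⟨t2, ht2⟩ : ∃ t2, cs = '/' :: '/' :: t2 := by
        cases cs with
        | nil => exact absurd (congrArg List.length htk) (by simp)
        | cons a cs' =>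
          cases cs' with
          | nil => exact absurd (congrArg List.length htk) (by simp)
          | cons b t2 =>
            have h1 : ([c, a, b] : List Char) = [':', '/', '/'] := by
              simpa using htk
            simp only [List.cons.injEq, and_true] at h1
            exact ⟨t2, by rw [h1.2.1, h1.2.2]⟩
      subst ht2
      subst hc
      rw [show pvScanB ('/' :: '/' :: t2) (i+1) (i : Int) (-1) (-1)
            = pvScanB ('/' :: t2) (i+1+1) (i : Int) (-1) (-1) from by
          rw [show pvScanB ('/' :: '/' :: t2) (i+1) (i : Int) (-1) (-1)
                = if (i:Int) < 0 then
                    (if ('/' : Char) = ':' ∧ ('/' :: '/' :: t2).take 3 = "://".toList then pvScanB ('/' :: t2) (i+1+1) ((i+1 : Nat) : Int) (-1) (-1)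
                     else pvScanB ('/' :: t2) (i+1+1) (i : Int) (-1) (-1))
                  else if ('/' : Char) = ':' ∧ (-1:Int) < 0 ∧ (i:Int) + 3 ≤ ((i+1 : Nat) : Int) then pvScanB ('/' :: t2) (i+1+1) (i : Int) ((i+1 : Nat) : Int) (-1)
                  else if ('/' : Char) = '@' then pvScanB ('/' :: t2) (i+1+1) (i : Int) (-1) ((i+1 : Nat) : Int)
                  else pvScanB ('/' :: t2) (i+1+1) (i : Int) (-1) (-1) from rfl]
          rw [if_neg (by omega), if_neg (by simp), if_neg (by simp)]]
      rw [show pvScanB ('/' :: t2) (i+1+1) (i : Int) (-1) (-1)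
            = pvScanB t2 (i+1+1+1) (i : Int) (-1) (-1) from by
          rw [show pvScanB ('/' :: t2) (i+1+1) (i : Int) (-1) (-1)
                = if (i:Int) < 0 then
                    (if ('/' : Char) = ':' ∧ ('/' :: t2).take 3 = "://".toList then pvScanB t2 (i+1+1+1) ((i+1+1 : Nat) : Int) (-1) (-1)
                     else pvScanB t2 (i+1+1+1) (i : Int) (-1) (-1))
                  else if ('/' : Char) = ':' ∧ (-1:Int) < 0 ∧ (i:Int) + 3 ≤ ((i+1+1 : Nat) : Int) then pvScanB t2 (i+1+1+1) (i : Int) ((i+1+1 : Nat) : Int) (-1)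
                  else if ('/' : Char) = '@' then pvScanB t2 (i+1+1+1) (i : Int) (-1) ((i+1+1 : Nat) : Int)
                  else pvScanB t2 (i+1+1+1) (i : Int) (-1) (-1) from rfl]
          rw [if_neg (by omega), if_neg (by simp), if_neg (by simp)]]
      norm_num
    · rw [if_neg (fun h => hp (hiff.mp h)), if_neg hp, ih (i+1)]
      have hge := PySem.Chars.neg_one_le_find cs "://".toList
      by_cases h2 : PySem.Chars.find cs "://".toList = -1
      · simp only [h2]
        norm_num
      · simp only [if_neg h2]
        rw [if_neg (show ¬ (PySem.Chars.find cs "://".toList + 1 = -1) from by omega)]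
        set n := (PySem.Chars.find cs "://".toList).toNat with hn
        have htn : (PySem.Chars.find cs "://".toList + 1).toNat = n + 1 := by omega
        rw [htn]
        have hd : (c :: cs).drop (n + 1 + 3) = cs.drop (n + 3) := by
          rw [show n + 1 + 3 = (n + 3) + 1 from by omega]
          exact List.drop_succ_cons
        rw [hd]
        have e1 : i + 1 + n + 3 = i + (n + 1) + 3 := by omega
        have e2 : (((i + 1 : Nat)) : Int) + (n : Int) = (i : Int) + (((n + 1 : Nat)) : Int) := by
          push_cast; ring
        rw [e1, e2]


theorem pvKey2 (v : List Char) : pvRedactB v = pvRedactC v := by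
  unfold pvRedactB pvRedactC
  rw [pvScanB_pre v 0]
  by_cases h0 : PySem.Chars.find v "://".toList = -1
  · rw [if_pos h0, if_pos h0]
    norm_num
  · rw [if_neg h0, if_neg h0]
    have hge : (0:Int) ≤ PySem.Chars.find v "://".toList := by
      have := PySem.Chars.neg_one_le_find v "://".toList
      omega
    set n := (PySem.Chars.find v "://".toList).toNat with hn
    rw [pvScanB_post (v.drop (n + 3)) (0 + n + 3) (((0:Nat) : Int) + (n : Int)) (-1) (-1)
      (by push_cast; omega) (by push_cast; omega)]
    simp only [Nat.cast_zero, zero_add]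
    rw [if_pos (show (-1:Int) < 0 from by omega)]
    rw [PySem.List.slice_to_natCast]
    simp only [show "@".toList = ['@'] from rfl, show ":".toList = [':'] from rfl]
    set rest := v.drop (n + 3) with hrest
    set J := PySem.Chars.rfind rest ['@'] with hJ
    set K := PySem.Chars.find rest [':'] with hK
    have hJge : -1 ≤ J := pvNegOneLe_rfind rest ['@']
    have hKge : -1 ≤ K := PySem.Chars.neg_one_le_find rest [':']
    by_cases hmem : PySem.Chars.lower (v.take n) ∈ pvSchemes
    · rw [if_pos hmem, if_neg (show ¬ (((n : Nat) : Int) < 0 ∨ PySem.Chars.lower (v.take n) ∉ pvSchemes) from by push_neg; exact ⟨by omega, hmem⟩)]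
      by_cases hj : J = -1
      · rw [if_pos hj, if_pos (Or.inl (by rw [if_pos hj]; omega))]
      · rw [if_neg hj, pvFind_single_take ':' rest J.toNat,
          Int.toNat_of_nonneg (show (0:Int) ≤ J from by omega)]
        simp only [if_neg hj]
        by_cases hk : K = -1
        · rw [if_pos (by rw [if_neg (show ¬ (0 ≤ K ∧ K < J) from fun h => by omega)]),
            if_pos (Or.inr (Or.inl (by rw [if_pos hk]; omega)))]
        · simp only [if_neg hk]
          rcases lt_trichotomy K J with hlt | heq | hgt
          · rw [if_pos (show 0 ≤ K ∧ K < J from ⟨by omega, hlt⟩), if_neg hk,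
              if_neg (show ¬ ((((n+3 : Nat)) : Int) + J < 0 ∨ (((n+3 : Nat)) : Int) + K < 0 ∨ (((n+3 : Nat)) : Int) + J < (((n+3 : Nat)) : Int) + K) from by
                push_neg; exact ⟨by omega, by omega, by omega⟩)]
            rw [← hK]
            have hu : List.take K.toNat (List.take J.toNat rest) = List.take K.toNat rest := by
              rw [List.take_take, min_eq_left (show K.toNat ≤ J.toNat from by omega)]
            have hs1 : PySem.List.slice v (some ((n : Int) + 3)) (some (((n+3 : Nat) : Int) + K))
                = List.take K.toNat rest := by
              rw [show ((n : Int) + 3) = ((n+3 : Nat) : Int) from by push_cast; ring]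
              rw [PySem.List.slice_toNat v (by positivity) (by omega)]
              rw [show (((n+3 : Nat) : Int)).toNat = n + 3 from Int.toNat_natCast _]
              rw [show ((((n+3 : Nat)) : Int) + K).toNat = (n+3) + K.toNat from by omega]
              rw [show (n+3) + K.toNat - (n+3) = K.toNat from by omega, ← hrest]
            have hs2 : PySem.List.slice v (some (((n+3 : Nat) : Int) + J + 1)) none
                = List.drop (J.toNat + 1) rest := by
              rw [PySem.List.slice_from v (by omega)]
              rw [show ((((n+3 : Nat)) : Int) + J + 1).toNat = (n+3) + (J.toNat + 1) from by omega]
              rw [← List.drop_drop, ← hrest]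
            rw [hs1, hs2, hu]
          · exfalso
            obtain ⟨hpK, -⟩ := PySem.Chars.find_spec (show (0:Int) ≤ K from by omega)
            rcases pvRfind_single_prefix '@' rest with h | ⟨-, hpJ⟩
            · exact hj h
            · rw [← hK] at hpK
              rw [← hJ] at hpJ
              rw [heq] at hpK
              obtain ⟨a, ha⟩ := hpK
              obtain ⟨b, hb⟩ := hpJ
              rw [← hb] at ha
              simp at ha
          · rw [if_pos (by rw [if_neg (show ¬ (0 ≤ K ∧ K < J) from fun h => by omega)]),
              if_pos (Or.inr (Or.inr (by omega)))]
    · rw [if_neg hmem, if_pos (Or.inr hmem)]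

-- ===== VERDICT (by name: the statement is the Claim_ definition above) =====
theorem redact_database_url_py_spec : Claim_equal_redact_database_url_py := by
  intro url _
  unfold Spec_redact_database_url_py redact_database_url_py redact_database_url_py_alt
  rw [pvKey, pvKey2]
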